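-- pv_equiv track=rewrite | github.com/OmarMRIS/Projects-2024 | TESTS/Term 1 (G11)/Upgraded Caesar Cipher.py | double_caesar_decrypt
-- ===== SOURCE A (Python) =====
-- def double_caesar_decrypt(ciphertext, key1, key2):  # decrypt function
--     decrypted_text = ""  # empty string where the decrypted text will be stored
--     position = 0  # position of each letter starting from the first letter
--
--     for letter in ciphertext:
--         char = letter
--         if char.isalpha():  # Alphabetic check
--             if position % 2 == 0:  # odd and even part
--                 shift = key1
--             else:
--                 shift = key2
--             if char.isupper():  # if the character is uppercase, do the following
--                 decrypted_char = chr(((ord(char) - ord('A') - shift) % 26) + ord('A'))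
--             else:
--                 decrypted_char = chr(((ord(char) - ord('a') - shift) % 26) + ord('a'))
--         else:
--             decrypted_char = char  #characters that are not alphanumeric stay the same
--         decrypted_text += decrypted_char  # storing part for decryption
--         position += 1  #incremention
--     return decrypted_text
-- ===== SOURCE B (Python) =====
-- def _caesar_dec(s, shift):
--     out = []
--     for c in s:
--         if c.isalpha():
--             base = ord('A') if c.isupper() else ord('a')
--             out.append(chr((ord(c) - base - shift) % 26 + base))
--         else:
--             out.append(c)
--     return "".join(out)
--
--
-- def double_caesar_decrypt(ciphertext, key1, key2):
--     even = _caesar_dec(ciphertext[::2], key1)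
--     odd = _caesar_dec(ciphertext[1::2], key2)
--     pairs = [e + o for e, o in zip(even, odd)]
--     return "".join(pairs) + even[len(odd):]
-- ===== Notes on version B (the rewrite author's own statement) =====
-- stated objective: alternative
-- what changed: Instead of one positional loop choosing a key per character, B splits the ciphertext into its even- and odd-index slices, decrypts each slice as a whole with a single fixed key, and interleaves the two decrypted slices back together.
import Mathlib
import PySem

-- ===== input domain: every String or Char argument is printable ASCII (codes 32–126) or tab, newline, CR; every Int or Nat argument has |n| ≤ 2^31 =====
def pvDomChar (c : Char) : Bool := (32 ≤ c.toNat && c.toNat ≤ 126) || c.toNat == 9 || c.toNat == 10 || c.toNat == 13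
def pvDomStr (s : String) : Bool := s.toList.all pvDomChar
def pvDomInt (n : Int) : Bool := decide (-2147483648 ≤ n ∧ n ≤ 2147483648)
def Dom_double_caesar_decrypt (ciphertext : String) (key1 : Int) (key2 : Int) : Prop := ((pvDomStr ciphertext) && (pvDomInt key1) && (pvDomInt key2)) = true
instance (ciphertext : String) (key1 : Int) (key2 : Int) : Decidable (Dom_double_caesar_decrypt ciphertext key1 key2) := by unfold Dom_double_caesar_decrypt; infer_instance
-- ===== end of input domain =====

-- B decrypts the even-index and odd-index slices separately (each a whole pass with one
-- fixed key) and interleaves the results, instead of A's positional key-alternating loop.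


-- shared letter formulas: chr((ord(c) - ord('A') - shift) % 26 + ord('A')) and the lowercase
-- twin, the exact expression both Source A and Source B contain (ord 'A' = 65, ord 'a' = 97)
def pvDecUpper (shift : Int) (c : Char) : Char :=
  Char.ofNat ((PySem.Int.mod ((c.toNat : Int) - 65 - shift) 26 + 65).toNat)
def pvDecLower (shift : Int) (c : Char) : Char :=
  Char.ofNat ((PySem.Int.mod ((c.toNat : Int) - 97 - shift) 26 + 97).toNat)

-- ===== PORT A =====
-- the body of A's for-loop: state is (decrypted_text as List Char, position)
def pvStepA (key1 key2 : Int) (st : List Char × Int) (letter : Char) : List Char × Int :=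
  let char := letter
  let decrypted_char :=
    if PySem.Chars.isalpha char then
      let shift := if PySem.Int.mod st.2 2 == 0 then key1 else key2
      if PySem.Chars.isupper char then pvDecUpper shift char
      else pvDecLower shift char
    else char
  (st.1 ++ [decrypted_char], st.2 + 1)

def double_caesar_decrypt (ciphertext : String) (key1 : Int) (key2 : Int) : String :=
  String.ofList ((ciphertext.toList.foldl (pvStepA key1 key2) ([], 0)).1)

-- ===== PORT B =====
-- ciphertext[::2] / ciphertext[1::2]: hand port of Python's extended slice with step 2
-- over the whole string (exact: every second code point from index 0 resp. 1)
mutual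
def pvEvens : List Char → List Char
  | [] => []
  | x :: t => x :: pvOdds t
def pvOdds : List Char → List Char
  | [] => []
  | _ :: t => pvEvens t
end

-- _caesar_dec(s, shift): one pass over s with a single fixed key, appended to a list
def pvCaesarDec (s : List Char) (shift : Int) : List Char :=
  s.foldl (fun out c =>
    out ++ [if PySem.Chars.isalpha c then
              (if PySem.Chars.isupper c then pvDecUpper shift c else pvDecLower shift c)
            else c]) []

-- pairs = [e + o for e, o in zip(even, odd)]; "".join(pairs) + even[len(odd):]
def double_caesar_decrypt_alt (ciphertext : String) (key1 : Int) (key2 : Int) : String :=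
  let even := pvCaesarDec (pvEvens ciphertext.toList) key1
  let odd := pvCaesarDec (pvOdds ciphertext.toList) key2
  String.ofList (((even.zip odd).map (fun p => [p.1, p.2])).flatten
    ++ PySem.List.slice even (some (odd.length : Int)) none)

-- ===== PRECONDITION & SPEC =====
def Spec_double_caesar_decrypt (ciphertext : String) (key1 : Int) (key2 : Int) (out : String) : Prop := out = double_caesar_decrypt_alt ciphertext key1 key2
instance (ciphertext : String) (key1 : Int) (key2 : Int) (out : String) : Decidable (Spec_double_caesar_decrypt ciphertext key1 key2 out) := by unfold Spec_double_caesar_decrypt; infer_instance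

-- ===== CLAIM (what is proved, stated in full; the proofs are below) =====
def Claim_equal_double_caesar_decrypt : Prop := ∀ (ciphertext : String) (key1 : Int) (key2 : Int), Dom_double_caesar_decrypt ciphertext key1 key2 → Spec_double_caesar_decrypt ciphertext key1 key2 (double_caesar_decrypt ciphertext key1 key2)

-- ===== LEMMAS AND PROOFS =====

-- the per-character decryption with one fixed key
def pvDecChar (shift : Int) (c : Char) : Char :=
  if PySem.Chars.isalpha c then
    (if PySem.Chars.isupper c then pvDecUpper shift c else pvDecLower shift c)
  else c

-- A's per-(position, char) function
def pvGA (k1 k2 : Int) (p : Int × Char) : Char :=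
  pvDecChar (if PySem.Int.mod p.1 2 == 0 then k1 else k2) p.2

-- interleave as Source B builds it: zipped pairs flattened, then the leftover of the first list
def pvItl (e o : List Char) : List Char :=
  ((e.zip o).map (fun p => [p.1, p.2])).flatten ++ e.drop o.length

theorem pv_foldl_spec (key1 key2 : Int) (l : List Char) (acc : List Char) (pos : Int) :
    (l.foldl (pvStepA key1 key2) (acc, pos)).1
      = acc ++ (PySem.List.enumerate l pos).map (pvGA key1 key2) := by
  induction l generalizing acc pos with
  | nil => simp
  | cons x xs ih =>
      simp only [List.foldl_cons, PySem.List.enumerate_cons, List.map_cons]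
      rw [ih]
      simp [pvStepA, pvGA, pvDecChar]

theorem pv_caesarDec_eq_map (s : List Char) (shift : Int) :
    pvCaesarDec s shift = s.map (pvDecChar shift) := by
  unfold pvCaesarDec
  have h := PySem.List.foldl_append_singleton_eq_map (f := pvDecChar shift) (l := s)
    (acc := ([] : List Char))
  simpa [pvDecChar] using h

theorem pv_evens_odds_len (l : List Char) :
    (pvOdds l).length ≤ (pvEvens l).length ∧ (pvEvens l).length ≤ (pvOdds l).length + 1 := by
  induction l with
  | nil => simp [pvEvens, pvOdds]
  | cons x t ih => simp [pvEvens, pvOdds]; omega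

theorem pv_itl_swap (e : List Char) : ∀ (a : Char) (o : List Char),
    e.length ≤ o.length → o.length ≤ e.length + 1 →
    pvItl (a :: e) o = a :: pvItl o e := by
  induction e with
  | nil =>
      intro a o h1 h2
      match o with
      | [] => simp [pvItl]
      | [b] => simp [pvItl]
      | b :: c :: o' => simp at h2
  | cons c e' ih =>
      intro a o h1 h2
      match o with
      | [] => simp at h1
      | b :: o' =>
          simp only [List.length_cons] at h1 h2
          have step : pvItl (c :: e') o' = c :: pvItl o' e' :=
            ih c o' (by omega) (by omega)
          simp only [pvItl, List.zip_cons_cons, List.map_cons, List.flatten_cons,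
            List.length_cons, List.drop_succ_cons] at *
          simp [step]

theorem pv_mod2_flip (pos : Int) :
    (PySem.Int.mod (pos + 1) 2 == 0) = !(PySem.Int.mod pos 2 == 0) := by
  rw [Bool.eq_iff_iff]
  simp only [beq_iff_eq, PySem.Int.mod_eq_zero_iff_dvd, Bool.not_eq_true', beq_eq_false_iff_ne,
    Ne, PySem.Int.mod_eq_zero_iff_dvd]
  omega

theorem pv_main (k1 k2 : Int) (l : List Char) : ∀ (pos : Int),
    (PySem.List.enumerate l pos).map (pvGA k1 k2)
      = if PySem.Int.mod pos 2 == 0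
        then pvItl ((pvEvens l).map (pvDecChar k1)) ((pvOdds l).map (pvDecChar k2))
        else pvItl ((pvEvens l).map (pvDecChar k2)) ((pvOdds l).map (pvDecChar k1)) := by
  induction l with
  | nil => intro pos; simp [pvEvens, pvOdds, pvItl]
  | cons x t ih =>
      intro pos
      have hlen := pv_evens_odds_len t
      simp only [PySem.List.enumerate_cons, List.map_cons, ih (pos + 1), pv_mod2_flip,
        pvEvens, pvOdds]
      by_cases h : (PySem.Int.mod pos 2 == 0) = true
      · simp only [h, Bool.not_true, if_true, if_false, Bool.false_eq_true]
        rw [pv_itl_swap _ _ _ (by simpa using hlen.1) (by simpa using hlen.2)]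
        rw [beq_iff_eq, PySem.Int.mod_eq_zero_iff_dvd] at h
        simp [pvGA, h]
      · simp only [eq_false_of_ne_true h, Bool.not_false, if_true, if_false,
          Bool.false_eq_true]
        rw [pv_itl_swap _ _ _ (by simpa using hlen.1) (by simpa using hlen.2)]
        simp only [beq_iff_eq, PySem.Int.mod_eq_zero_iff_dvd] at h
        simp [pvGA, h]

-- ===== VERDICT (by name: the statement is the Claim_ definition above) =====
theorem double_caesar_decrypt_spec : Claim_equal_double_caesar_decrypt := by
  intro ciphertext key1 key2 _
  unfold Spec_double_caesar_decrypt double_caesar_decrypt double_caesar_decrypt_alt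
  rw [pv_foldl_spec, pv_main]
  simp only [List.nil_append, pv_caesarDec_eq_map, PySem.Int.mod]
  norm_num [pvItl, PySem.List.slice_from_natCast]
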